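-- pv_equiv track=rewrite | github.com/Tom-0727/Tom_Notes | tokenization/tools/pre_process.py | bpe_pre_tokenization
-- ===== SOURCE A (Python) =====
-- from typing import List
--
-- def bpe_pre_tokenization(text: str)-> List[str]:
--     tmp = ''
--     opt = []
--     for i in text:
--         if i != " ":
--             tmp += i
--         else:
--             opt.append(tmp)
--             tmp = 'Ġ'
--     opt.append(tmp)
--     return opt
-- ===== SOURCE B (Python) =====
-- from typing import List
--
-- def bpe_pre_tokenization(text: str) -> List[str]:
--     parts = text.split(' ')
--     return [parts[0]] + ['Ġ' + p for p in parts[1:]]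
-- ===== Notes on version B (the rewrite author's own statement) =====
-- stated objective: simpler
-- what changed: Replaces the per-character accumulate-and-flush loop with a single library split on the space character, prefixing every segment after the first with the marker.
import Mathlib
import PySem

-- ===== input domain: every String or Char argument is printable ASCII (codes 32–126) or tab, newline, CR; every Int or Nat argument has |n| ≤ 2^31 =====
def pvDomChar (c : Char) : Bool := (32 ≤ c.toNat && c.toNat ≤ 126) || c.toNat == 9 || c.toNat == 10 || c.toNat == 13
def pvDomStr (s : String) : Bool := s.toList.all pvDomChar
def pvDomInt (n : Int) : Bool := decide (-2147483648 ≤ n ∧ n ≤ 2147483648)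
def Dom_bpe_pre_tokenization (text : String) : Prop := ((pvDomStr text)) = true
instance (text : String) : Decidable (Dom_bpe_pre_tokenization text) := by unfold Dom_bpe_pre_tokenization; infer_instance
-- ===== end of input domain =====

-- B replaces A's per-character accumulate-and-flush loop with one split(' ') plus a
-- first-unprefixed / rest-Ġ-prefixed transform (objective: simpler).


-- ===== PORT A =====
-- the for-loop of A: state is (tmp, opt); on each char either extend tmp or flush it
def bpeLoopA : List Char → String → List String → List String
  | [], tmp, opt => opt ++ [tmp]            -- final opt.append(tmp)
  | c :: cs, tmp, opt =>
      if c ≠ ' ' then bpeLoopA cs (tmp.push c) opt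
      else bpeLoopA cs "Ġ" (opt ++ [tmp])

def bpe_pre_tokenization (text : String) : List String :=
  bpeLoopA text.toList "" []

-- ===== PORT B =====
def bpe_pre_tokenization_alt (text : String) : List String :=
  match (PySem.Chars.splitOn text.toList [' ']).map String.ofList with
  | [] => []          -- unreachable: split(' ') is never empty
  | p :: rest => p :: rest.map (fun s => "Ġ" ++ s)

-- ===== PRECONDITION & SPEC =====
def Spec_bpe_pre_tokenization (text : String) (out : List String) : Prop := out = bpe_pre_tokenization_alt text
instance (text : String) (out : List String) : Decidable (Spec_bpe_pre_tokenization text out) := by unfold Spec_bpe_pre_tokenization; infer_instance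

-- ===== CLAIM (what is proved, stated in full; the proofs are below) =====
def Claim_equal_bpe_pre_tokenization : Prop := ∀ (text : String), Dom_bpe_pre_tokenization text → Spec_bpe_pre_tokenization text (bpe_pre_tokenization text)

-- ===== LEMMAS AND PROOFS =====

-- reference split on the single-char separator ' '
def spSp : List Char → List (List Char)
  | [] => [[]]
  | c :: cs => if c = ' ' then [] :: spSp cs
               else match spSp cs with
                    | [] => [[c]]
                    | p :: r => (c :: p) :: r

theorem spSp_ne_nil (l : List Char) : spSp l ≠ [] := by
  cases l with
  | nil => simp [spSp]
  | cons c cs =>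
      simp only [spSp]
      split
      · simp
      · cases h : spSp cs <;> simp

theorem splitOn_go_eq (fuel : Nat) :
    ∀ (l cur : List Char) (acc : List (List Char)), l.length < fuel →
      PySem.Chars.splitOn.go [' '] fuel l cur acc
        = acc.reverse ++ (cur.reverse ++ (spSp l).head! ) :: (spSp l).tail := by
  induction fuel with
  | zero => intro l cur acc h; omega
  | succ n ih =>
      intro l cur acc h
      cases l with
      | nil => simp [PySem.Chars.splitOn.go, spSp]
      | cons c cs =>
          by_cases hc : c = ' '
          · subst hc
            rw [PySem.Chars.splitOn.go]
            simp only [List.isPrefixOf, beq_self_eq_true, Bool.and_true, if_pos,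
              List.length_cons, List.length_nil, List.drop_succ_cons, List.drop_zero]
            rw [ih cs [] _ (by simpa using Nat.lt_of_succ_lt_succ h)]
            obtain ⟨p, r, hp⟩ : ∃ p r, spSp cs = p :: r := by
              cases hh : spSp cs with
              | nil => exact absurd hh (spSp_ne_nil cs)
              | cons p r => exact ⟨p, r, rfl⟩
            simp [spSp, hp]
          · rw [PySem.Chars.splitOn.go]
            have hpre : [' '].isPrefixOf (c :: cs) = false := by
              simp [List.isPrefixOf]; exact fun h' => absurd h'.symm hc
            rw [if_neg (by simp [hpre])]
            rw [ih cs (c :: cur) acc (by simpa using Nat.lt_of_succ_lt_succ h)]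
            obtain ⟨p, r, hp⟩ : ∃ p r, spSp cs = p :: r := by
              cases hh : spSp cs with
              | nil => exact absurd hh (spSp_ne_nil cs)
              | cons p r => exact ⟨p, r, rfl⟩
            simp [spSp, hc, hp]

theorem splitOn_eq_spSp (l : List Char) :
    PySem.Chars.splitOn l [' '] = spSp l := by
  rw [PySem.Chars.splitOn, splitOn_go_eq (l.length + 1) l [] [] (by omega)]
  obtain ⟨p, r, hp⟩ : ∃ p r, spSp l = p :: r := by
    cases hh : spSp l with
    | nil => exact absurd hh (spSp_ne_nil l)
    | cons p r => exact ⟨p, r, rfl⟩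
  simp [hp]

theorem bpeLoopA_eq (l : List Char) :
    ∀ (tmp : String) (opt : List String),
      bpeLoopA l tmp opt
        = opt ++ (tmp ++ String.ofList (spSp l).head!)
            :: ((spSp l).tail.map (fun q => "Ġ" ++ String.ofList q)) := by
  induction l with
  | nil => intro tmp opt; simp [bpeLoopA, spSp]
  | cons c cs ih =>
      intro tmp opt
      obtain ⟨p, r, hp⟩ : ∃ p r, spSp cs = p :: r := by
        cases hh : spSp cs with
        | nil => exact absurd hh (spSp_ne_nil cs)
        | cons p r => exact ⟨p, r, rfl⟩
      by_cases hc : c = ' '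
      · subst hc
        simp only [bpeLoopA, ne_eq, not_true_eq_false, if_false, ih, spSp, hp]
        simp
      · simp only [bpeLoopA, ne_eq, hc, not_false_eq_true, if_pos, ih, spSp, hp]
        have hpush : tmp.push c ++ String.ofList p = tmp ++ String.ofList (c :: p) := by
          apply String.ext
          simp
        simp [hpush]

-- ===== VERDICT (by name: the statement is the Claim_ definition above) =====
theorem bpe_pre_tokenization_spec : Claim_equal_bpe_pre_tokenization := by
  intro text _
  unfold Spec_bpe_pre_tokenization bpe_pre_tokenization bpe_pre_tokenization_alt
  rw [splitOn_eq_spSp, bpeLoopA_eq]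
  obtain ⟨p, r, hp⟩ : ∃ p r, spSp text.toList = p :: r := by
    cases hh : spSp text.toList with
    | nil => exact absurd hh (spSp_ne_nil text.toList)
    | cons p r => exact ⟨p, r, rfl⟩
  simp [hp, List.map_map, Function.comp]
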